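-- pv_equiv track=rewrite | github.com/TTOFFLINE-LEAK/ttoffline | v2.5.7/otp/ai/passlib/totp.py | _get_group_size
-- ===== SOURCE A (Python) =====
-- _chunk_sizes = [
--  4, 6, 5]
--
-- def _get_group_size(klen):
--     for size in _chunk_sizes:
--         if not klen % size:
--             return size
--
--     best = _chunk_sizes[0]
--     rem = 0
--     for size in _chunk_sizes:
--         if klen % size > rem:
--             best = size
--             rem = klen % size
--
--     return best
-- ===== SOURCE B (Python) =====
-- _chunk_sizes = [
--  4, 6, 5]
--
-- def _get_group_size(klen):
--     best = _chunk_sizes[0]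
--     rem = -1
--     for size in _chunk_sizes:
--         r = klen % size
--         if r == 0:
--             return size
--         if r > rem:
--             best, rem = size, r
--     return best
-- ===== Notes on version B (the rewrite author's own statement) =====
-- stated objective: simpler
-- what changed: Replaces A's two sequential passes over _chunk_sizes (one for an exact divisor, one scanning again for the maximum remainder) with a single pass that returns immediately on a zero remainder and otherwise tracks the first maximal remainder.
import Mathlib
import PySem

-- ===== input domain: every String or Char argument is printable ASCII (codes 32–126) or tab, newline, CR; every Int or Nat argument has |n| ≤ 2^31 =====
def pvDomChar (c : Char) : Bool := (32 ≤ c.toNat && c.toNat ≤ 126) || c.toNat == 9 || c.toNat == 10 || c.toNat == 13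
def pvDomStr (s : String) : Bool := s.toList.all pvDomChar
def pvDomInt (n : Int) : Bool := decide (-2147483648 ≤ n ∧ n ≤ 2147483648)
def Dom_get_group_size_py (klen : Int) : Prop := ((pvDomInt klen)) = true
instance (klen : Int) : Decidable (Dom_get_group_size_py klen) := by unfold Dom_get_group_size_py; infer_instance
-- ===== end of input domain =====

-- B collapses A's two passes over _chunk_sizes into one pass with an early return; objective: simpler.

-- ===== PORT A =====
def pvChunkSizes : List Int := [4, 6, 5]

-- first loop of A: return the first size dividing klen, if any
def pvFindDivisor (klen : Int) : List Int → Option Int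
  | [] => none
  | s :: rest => if PySem.Int.mod klen s = 0 then some s else pvFindDivisor klen rest

-- second loop of A: scan for the maximum remainder (strict >, first occurrence kept)
def pvBestLoop (klen : Int) (best rem : Int) : List Int → Int
  | [] => best
  | s :: rest =>
      if PySem.Int.mod klen s > rem then pvBestLoop klen s (PySem.Int.mod klen s) rest
      else pvBestLoop klen best rem rest

def get_group_size_py (klen : Int) : Int :=
  match pvFindDivisor klen pvChunkSizes with
  | some s => s
  | none => pvBestLoop klen 4 0 pvChunkSizes

-- ===== PORT B =====
-- single pass: early return on zero remainder, else track first maximal remainder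
def pvOnePass (klen : Int) (best rem : Int) : List Int → Int
  | [] => best
  | s :: rest =>
      let r := PySem.Int.mod klen s
      if r = 0 then s
      else if r > rem then pvOnePass klen s r rest
      else pvOnePass klen best rem rest

def get_group_size_py_alt (klen : Int) : Int :=
  pvOnePass klen 4 (-1) pvChunkSizes

-- ===== PRECONDITION & SPEC =====
def Spec_get_group_size_py (klen : Int) (out : Int) : Prop := out = get_group_size_py_alt klen
instance (klen : Int) (out : Int) : Decidable (Spec_get_group_size_py klen out) := by unfold Spec_get_group_size_py; infer_instance

-- ===== CLAIM (what is proved, stated in full; the proofs are below) =====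
def Claim_equal_get_group_size_py : Prop := ∀ (klen : Int), Dom_get_group_size_py klen → Spec_get_group_size_py klen (get_group_size_py klen)

-- ===== LEMMAS AND PROOFS =====

-- both programs depend on klen only through klen % 4, klen % 6, klen % 5,
-- which depend only on klen % 60
theorem pv_mod_of_dvd (k d : Int) (hd : 0 < d) (hdvd : d ∣ 60) :
    PySem.Int.mod k d = (k.emod 60).emod d := by
  rw [PySem.Int.mod_eq_emod_of_pos hd]
  exact (Int.emod_emod_of_dvd k hdvd).symm

theorem pv_main (klen : Int) : get_group_size_py klen = get_group_size_py_alt klen := by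
  have h4 := pv_mod_of_dvd klen 4 (by norm_num) (by norm_num)
  have h6 := pv_mod_of_dvd klen 6 (by norm_num) (by norm_num)
  have h5 := pv_mod_of_dvd klen 5 (by norm_num) (by norm_num)
  have hlo : 0 ≤ klen.emod 60 := Int.emod_nonneg _ (by norm_num)
  have hhi : klen.emod 60 < 60 := Int.emod_lt_of_pos _ (by norm_num)
  set r := klen.emod 60 with hr
  simp only [get_group_size_py, get_group_size_py_alt, pvChunkSizes, pvFindDivisor,
    pvBestLoop, pvOnePass, h4, h6, h5]
  interval_cases r <;> decide

-- ===== VERDICT (by name: the statement is the Claim_ definition above) =====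
theorem get_group_size_py_spec : Claim_equal_get_group_size_py := by
  intro klen _
  exact pv_main klen
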